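-- pv_equiv track=rewrite | github.com/CdubVentures/spec-harvester | tools/gui/app.py | stable_sort_columns
-- ===== SOURCE A (Python) =====
-- def col_to_index(column: str):
--     token_value = str(column or "").strip().upper()
--     if not token_value:
--         return None
--     total = 0
--     for ch in token_value:
--         if ch < "A" or ch > "Z":
--             return None
--         total = (total * 26) + (ord(ch) - 64)
--     return total if total > 0 else None
--
-- def normalize_col(value, fallback: str = ""):
--     token_value = str(value or "").strip().upper()
--     return token_value if col_to_index(token_value) else str(fallback or "").strip().upper()
--
-- def stable_sort_columns(values):
--     uniq = []
--     seen = set()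
--     for value in values or []:
--         col = normalize_col(value)
--         if not col or col in seen:
--             continue
--         seen.add(col)
--         uniq.append(col)
--     uniq.sort(key=lambda col: col_to_index(col) or 9999)
--     return uniq
-- ===== SOURCE B (Python) =====
-- def col_to_index(column: str):
--     token_value = str(column or "").strip().upper()
--     if not token_value:
--         return None
--     total = 0
--     for ch in token_value:
--         if ch < "A" or ch > "Z":
--             return None
--         total = (total * 26) + (ord(ch) - 64)
--     return total if total > 0 else None
--
--
-- def stable_sort_columns(values):
--     # Decorate-sort-collapse: tag every valid value with its numeric column
--     # index (duplicates kept), sort the pairs by index, then collapse runs of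
--     # equal indices in one adjacent scan.  Dedupe happens AFTER sorting, so no
--     # seen-set or dict is needed; equal indices always carry the same label.
--     keyed = []
--     for value in values or []:
--         tok = str(value or "").strip().upper()
--         idx = col_to_index(tok)
--         if idx:
--             keyed.append((idx, tok))
--     keyed.sort(key=lambda p: p[0])
--     out = []
--     prev = None
--     for idx, tok in keyed:
--         if idx != prev:
--             out.append(tok)
--             prev = idx
--     return out
-- ===== Notes on version B (the rewrite author's own statement) =====
-- stated objective: alternative
-- what changed: A dedupes during the scan with a seen-set and then sorts the unique labels with a recomputed key; B uses decorate-sort-collapse: it tags every valid value with its numeric index keeping duplicates, sorts the (index,label) pairs, and removes duplicates afterwards in a single adjacent scan over the sorted pairs (correct because the column index determines the normalized label).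
import Mathlib
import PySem

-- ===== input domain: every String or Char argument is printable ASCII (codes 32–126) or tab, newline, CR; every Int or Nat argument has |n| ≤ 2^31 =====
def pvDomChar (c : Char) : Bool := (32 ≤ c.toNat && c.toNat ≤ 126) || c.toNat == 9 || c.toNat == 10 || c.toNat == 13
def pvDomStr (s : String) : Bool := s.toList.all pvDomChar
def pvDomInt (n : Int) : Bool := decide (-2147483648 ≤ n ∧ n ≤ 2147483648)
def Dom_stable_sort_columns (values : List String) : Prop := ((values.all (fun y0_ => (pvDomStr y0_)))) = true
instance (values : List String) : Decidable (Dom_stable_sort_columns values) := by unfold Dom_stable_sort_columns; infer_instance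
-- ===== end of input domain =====

-- B replaces A's scan-with-seen-set-then-sort by decorate-sort-collapse: tag every valid
-- value with its index (duplicates kept), sort the pairs, collapse equal-index runs in one
-- adjacent scan (objective: alternative).

-- ===== PORT A =====
-- shared module helper col_to_index (identical in Source A and Source B); its for-loop with the
-- early 'return None' becomes the structural recursion colIndexGo
def colIndexGo : List Char → Int → Option Int
  | [], total => if total > 0 then some total else none
  | ch :: rest, total =>
    if ch < 'A' || ch > 'Z' then none
    else colIndexGo rest (total * 26 + ((ch.toNat : Int) - 64))

-- str(column or "").strip().upper(): for a str argument, 'column or ""' is column itself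
-- unless column is empty, and strip/upper of "" is "" — the same token either way
def col_to_index (column : String) : Option Int :=
  let tok := PySem.Chars.upper (PySem.Chars.strip column.toList)
  if tok = [] then none else colIndexGo tok 0

-- Python truthiness of 'if col_to_index(token_value)': None and 0 are falsy
def pyTruthyOptInt : Option Int → Bool
  | none => false
  | some n => n != 0

def normalize_col (value : String) (fallback : String) : String :=
  let tok := PySem.Chars.upper (PySem.Chars.strip value.toList)
  if pyTruthyOptInt (col_to_index (String.ofList tok)) then String.ofList tok
  else String.ofList (PySem.Chars.upper (PySem.Chars.strip fallback.toList))

-- the body of A's for-loop, on the state (uniq, seen)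
def stepA (st : List String × PySem.Set String) (value : String) : List String × PySem.Set String :=
  let col := normalize_col value ""
  if col = "" || PySem.Set.contains st.2 col then st
  else (st.1 ++ [col], PySem.Set.add st.2 col)

def stable_sort_columns (values : List String) : List String :=
  let st := values.foldl stepA ([], PySem.Set.empty)
  PySem.List.sorted st.1 (fun col => (col_to_index col).getD 9999) false

-- ===== PORT B =====
-- B's first loop: decorate each valid value with its column index ('if idx:' keeps
-- idx that is neither None nor 0)
def stepKey (acc : List (Int × String)) (value : String) : List (Int × String) :=
  let tok := String.ofList (PySem.Chars.upper (PySem.Chars.strip value.toList))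
  match col_to_index tok with
  | none => acc
  | some idx => if idx ≠ 0 then acc ++ [(idx, tok)] else acc

-- B's second loop: collapse runs of equal indices ('if idx != prev'; prev starts as None)
def dedupeStep (st : List String × Option Int) (p : Int × String) : List String × Option Int :=
  if some p.1 ≠ st.2 then (st.1 ++ [p.2], some p.1) else st

def stable_sort_columns_alt (values : List String) : List String :=
  let keyed := values.foldl stepKey []
  let sortedK := PySem.List.sorted keyed (fun p => p.1) false
  (sortedK.foldl dedupeStep ([], none)).1

-- ===== PRECONDITION & SPEC =====
def Spec_stable_sort_columns (values : List String) (out : List String) : Prop := out = stable_sort_columns_alt values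
instance (values : List String) (out : List String) : Decidable (Spec_stable_sort_columns values out) := by unfold Spec_stable_sort_columns; infer_instance

-- ===== CLAIM (what is proved, stated in full; the proofs are below) =====
def Claim_equal_stable_sort_columns : Prop := ∀ (values : List String), Dom_stable_sort_columns values → Spec_stable_sort_columns values (stable_sort_columns values)

-- ===== LEMMAS AND PROOFS =====

-- the key of A's final sort
def idxKey (c : String) : Int := (col_to_index c).getD 9999

-- a label A keeps: a valid column token, fixed by strip-then-upper
def GoodCol (c : String) : Prop :=
  (col_to_index c).isSome = true ∧
  PySem.Chars.upper (PySem.Chars.strip c.toList) = c.toList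

-- ---- character-level facts ----
lemma toNat_bounds_of_islower (c : Char) (h : PySem.Chars.islower c = true) :
    97 ≤ c.toNat ∧ c.toNat ≤ 122 := by
  simp [PySem.Chars.islower, Char.le_def] at h
  exact ⟨UInt32.le_iff_toNat_le.mp h.1, UInt32.le_iff_toNat_le.mp h.2⟩

lemma isspace_upperChar (c : Char) :
    PySem.Chars.isspace (PySem.Chars.upperChar c) = PySem.Chars.isspace c := by
  unfold PySem.Chars.upperChar
  by_cases h : PySem.Chars.islower c = true
  · obtain ⟨h1, h2⟩ := toNat_bounds_of_islower c h
    have hv : (Char.ofNat (c.toNat - 32)).toNat = c.toNat - 32 := by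
      rw [Char.toNat_ofNat]; simp [Nat.isValidChar]; omega
    have e1 : PySem.Chars.isspace (Char.ofNat (c.toNat - 32)) = false := by
      simp [PySem.Chars.isspace, hv]; omega
    have e2 : PySem.Chars.isspace c = false := by
      simp [PySem.Chars.isspace]; omega
    simp [h, e1, e2]
  · simp [h]

lemma upperChar_upperChar (c : Char) :
    PySem.Chars.upperChar (PySem.Chars.upperChar c) = PySem.Chars.upperChar c := by
  unfold PySem.Chars.upperChar
  by_cases h : PySem.Chars.islower c = true
  · obtain ⟨h1, h2⟩ := toNat_bounds_of_islower c h
    have hv : (Char.ofNat (c.toNat - 32)).toNat = c.toNat - 32 := by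
      rw [Char.toNat_ofNat]; simp [Nat.isValidChar]; omega
    have : PySem.Chars.islower (Char.ofNat (c.toNat - 32)) = false := by
      by_contra hx
      simp at hx
      obtain ⟨g1, g2⟩ := toNat_bounds_of_islower _ hx
      omega
    simp [h, this]
  · simp [h]

-- ---- strip/upper algebra ----
lemma upper_upper (l : List Char) : PySem.Chars.upper (PySem.Chars.upper l) = PySem.Chars.upper l := by
  simp only [PySem.Chars.upper, List.map_map]
  exact List.map_congr_left (fun c _ => upperChar_upperChar c)

lemma lstrip_upper (l : List Char) :
    PySem.Chars.lstrip (PySem.Chars.upper l) = PySem.Chars.upper (PySem.Chars.lstrip l) := by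
  simp only [PySem.Chars.lstrip, PySem.Chars.upper, List.dropWhile_map]
  rw [show (PySem.Chars.isspace ∘ PySem.Chars.upperChar) = PySem.Chars.isspace from funext isspace_upperChar]

lemma rstrip_upper (l : List Char) :
    PySem.Chars.rstrip (PySem.Chars.upper l) = PySem.Chars.upper (PySem.Chars.rstrip l) := by
  simp only [PySem.Chars.rstrip, PySem.Chars.upper, ← List.map_reverse, List.dropWhile_map]
  rw [show (PySem.Chars.isspace ∘ PySem.Chars.upperChar) = PySem.Chars.isspace from funext isspace_upperChar]

lemma strip_upper (l : List Char) :
    PySem.Chars.strip (PySem.Chars.upper l) = PySem.Chars.upper (PySem.Chars.strip l) := by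
  simp only [PySem.Chars.strip, lstrip_upper, rstrip_upper]

lemma lstrip_rstrip_of_fixed (a : List Char) (ha : PySem.Chars.lstrip a = a) :
    PySem.Chars.lstrip (PySem.Chars.rstrip a) = PySem.Chars.rstrip a := by
  have hpre : PySem.Chars.rstrip a <+: a := by
    unfold PySem.Chars.rstrip
    rw [← List.reverse_suffix]
    simpa using List.dropWhile_suffix (l := a.reverse) PySem.Chars.isspace
  cases hr : PySem.Chars.rstrip a with
  | nil => simp [PySem.Chars.lstrip]
  | cons h t =>
    rw [hr] at hpre
    obtain ⟨r, hr2⟩ := hpre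
    have hh : PySem.Chars.isspace h = false := by
      by_contra hx
      simp only [Bool.not_eq_false] at hx
      rw [← hr2] at ha
      rw [List.cons_append, PySem.Chars.lstrip, List.dropWhile_cons, if_pos hx] at ha
      have := List.Sublist.length_le (List.dropWhile_sublist (p := PySem.Chars.isspace) (l := t ++ r))
      rw [ha] at this
      simp at this
    simp [PySem.Chars.lstrip, hh]

lemma strip_strip (l : List Char) : PySem.Chars.strip (PySem.Chars.strip l) = PySem.Chars.strip l := by
  simp only [PySem.Chars.strip]
  have h1 : PySem.Chars.lstrip (PySem.Chars.lstrip l) = PySem.Chars.lstrip l :=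
    List.dropWhile_idempotent _ _
  rw [lstrip_rstrip_of_fixed _ h1]
  unfold PySem.Chars.rstrip
  rw [List.reverse_reverse, List.dropWhile_idempotent]

lemma token_fixed (l : List Char) :
    PySem.Chars.upper (PySem.Chars.strip (PySem.Chars.upper (PySem.Chars.strip l)))
      = PySem.Chars.upper (PySem.Chars.strip l) := by
  rw [strip_upper, strip_strip, upper_upper]

-- ---- col_to_index characterisation and injectivity on good labels ----
def okCh (ch : Char) : Prop := 'A' ≤ ch ∧ ch ≤ 'Z'

def acc (t : Int) (l : List Char) : Int :=
  l.foldl (fun total ch => total * 26 + ((ch.toNat : Int) - 64)) t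

lemma okCh_digit_bounds (ch : Char) (h : okCh ch) :
    1 ≤ (ch.toNat : Int) - 64 ∧ (ch.toNat : Int) - 64 ≤ 26 := by
  obtain ⟨h1, h2⟩ := h
  rw [Char.le_def] at h1 h2
  have g1 := UInt32.le_iff_toNat_le.mp h1
  have g2 := UInt32.le_iff_toNat_le.mp h2
  have e1 : 'A'.toNat = 65 := rfl
  have e2 : 'Z'.toNat = 90 := rfl
  simp only [Char.toNat] at g1 g2 e1 e2 ⊢
  omega

lemma go_some_iff (l : List Char) (t n : Int) :
    colIndexGo l t = some n ↔ (∀ ch ∈ l, okCh ch) ∧ n = acc t l ∧ 0 < n := by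
  induction l generalizing t with
  | nil =>
    simp only [colIndexGo, acc, List.foldl_nil]
    split_ifs with h
    · constructor
      · rintro ⟨rfl⟩; exact ⟨by simp, rfl, h⟩
      · rintro ⟨-, rfl, -⟩; rfl
    · constructor
      · rintro ⟨⟩
      · rintro ⟨-, rfl, hn⟩; omega
  | cons ch rest ih =>
    simp only [colIndexGo, acc, List.foldl_cons]
    by_cases hch : (ch < 'A' || ch > 'Z') = true
    · rw [if_pos hch]
      constructor
      · rintro ⟨⟩
      · rintro ⟨hall, -, -⟩
        have := hall ch (by simp)
        obtain ⟨a1, a2⟩ := this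
        simp only [Bool.or_eq_true, decide_eq_true_eq] at hch
        rcases hch with hlt | hgt
        · exact absurd hlt (not_lt.mpr a1)
        · exact absurd hgt (not_lt.mpr a2)
    · rw [if_neg hch]
      rw [ih]
      unfold acc
      constructor
      · rintro ⟨hall, rfl, hn⟩
        refine ⟨?_, rfl, hn⟩
        intro c hc
        rw [List.mem_cons] at hc
        rcases hc with rfl | hc
        · simp only [Bool.or_eq_true, decide_eq_true_eq, not_or, not_lt] at hch
          exact ⟨hch.1, hch.2⟩
        · exact hall c hc
      · rintro ⟨hall, rfl, hn⟩
        exact ⟨fun c hc => hall c (List.mem_cons_of_mem _ hc), rfl, hn⟩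

lemma acc_ge (l : List Char) (t : Int) (h : ∀ ch ∈ l, okCh ch) (ht : 0 ≤ t) : t ≤ acc t l := by
  induction l generalizing t with
  | nil => simp [acc]
  | cons ch rest ih =>
    have hd := okCh_digit_bounds ch (h ch (by simp))
    have step : t ≤ t * 26 + ((ch.toNat : Int) - 64) := by nlinarith [hd.1]
    have := ih (t * 26 + ((ch.toNat : Int) - 64)) (fun c hc => h c (List.mem_cons_of_mem _ hc)) (by omega)
    simp only [acc, List.foldl_cons] at *
    omega

lemma acc_pos (l : List Char) (h : ∀ ch ∈ l, okCh ch) (hne : l ≠ []) : 0 < acc 0 l := by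
  cases l with
  | nil => exact absurd rfl hne
  | cons ch rest =>
    have hd := okCh_digit_bounds ch (h ch (by simp))
    have := acc_ge rest ((0:Int) * 26 + ((ch.toNat : Int) - 64)) (fun c hc => h c (List.mem_cons_of_mem _ hc)) (by omega)
    simp only [acc, List.foldl_cons] at *
    omega

lemma acc_inj (l1 l2 : List Char) (h1 : ∀ ch ∈ l1, okCh ch) (h2 : ∀ ch ∈ l2, okCh ch)
    (heq : acc 0 l1 = acc 0 l2) : l1 = l2 := by
  induction l1 using List.reverseRecOn generalizing l2 with
  | nil =>
    cases l2 using List.reverseRecOn with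
    | nil => rfl
    | append_singleton l2 c2 =>
      exfalso
      have := acc_pos (l2 ++ [c2]) h2 (by simp)
      simp only [acc, List.foldl_nil] at heq
      simp only [acc] at this
      omega
  | append_singleton l1 c1 ih =>
    cases l2 using List.reverseRecOn with
    | nil =>
      exfalso
      have := acc_pos (l1 ++ [c1]) h1 (by simp)
      simp only [acc, List.foldl_nil] at heq
      simp only [acc] at this
      omega
    | append_singleton l2 c2 =>
      have e1 : acc 0 (l1 ++ [c1]) = acc 0 l1 * 26 + ((c1.toNat : Int) - 64) := by
        simp [acc, List.foldl_append]
      have e2 : acc 0 (l2 ++ [c2]) = acc 0 l2 * 26 + ((c2.toNat : Int) - 64) := by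
        simp [acc, List.foldl_append]
      have b1 := okCh_digit_bounds c1 (h1 c1 (by simp))
      have b2 := okCh_digit_bounds c2 (h2 c2 (by simp))
      rw [e1, e2] at heq
      have hdig : (c1.toNat : Int) - 64 = (c2.toNat : Int) - 64 ∧ acc 0 l1 = acc 0 l2 := by
        constructor <;> omega
      have hc : c1 = c2 := by
        have : c1.toNat = c2.toNat := by omega
        rw [← Char.ofNat_toNat c1, ← Char.ofNat_toNat c2, this]
      have hl : l1 = l2 := ih l2 (fun c hc => h1 c (by simp [hc])) (fun c hc => h2 c (by simp [hc])) hdig.2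
      rw [hc, hl]

lemma col_to_index_pos (s : String) (n : Int) (h : col_to_index s = some n) : 0 < n := by
  simp only [col_to_index] at h
  split_ifs at h with he
  · exact ((go_some_iff _ _ _).mp h).2.2

lemma good_go (c : String) (n : Int) (hc : PySem.Chars.upper (PySem.Chars.strip c.toList) = c.toList)
    (e : col_to_index c = some n) : colIndexGo c.toList 0 = some n := by
  simp only [col_to_index, hc] at e
  split_ifs at e with h
  · exact e

lemma good_inj (c1 c2 : String) (h1 : GoodCol c1) (h2 : GoodCol c2)
    (heq : idxKey c1 = idxKey c2) : c1 = c2 := by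
  obtain ⟨hs1, hc1⟩ := h1
  obtain ⟨hs2, hc2⟩ := h2
  obtain ⟨n1, e1⟩ := Option.isSome_iff_exists.mp hs1
  obtain ⟨n2, e2⟩ := Option.isSome_iff_exists.mp hs2
  have hk : n1 = n2 := by simpa [idxKey, e1, e2] using heq
  have g1 := (go_some_iff _ _ _).mp (good_go c1 n1 hc1 e1)
  have g2 := (go_some_iff _ _ _).mp (good_go c2 n2 hc2 e2)
  have : c1.toList = c2.toList := by
    apply acc_inj _ _ g1.1 g2.1
    rw [← g1.2.1, ← g2.2.1, hk]
  exact String.toList_inj.mp this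

-- ---- A's step-level facts ----
lemma normalize_none (v : String)
    (h : col_to_index (String.ofList (PySem.Chars.upper (PySem.Chars.strip v.toList))) = none) :
    normalize_col v "" = "" := by
  simp only [normalize_col, h, pyTruthyOptInt]
  rfl

lemma normalize_some (v : String) (n : Int)
    (h : col_to_index (String.ofList (PySem.Chars.upper (PySem.Chars.strip v.toList))) = some n) :
    normalize_col v "" = String.ofList (PySem.Chars.upper (PySem.Chars.strip v.toList)) := by
  have hpos := col_to_index_pos _ _ h
  simp only [normalize_col, h, pyTruthyOptInt]
  rw [if_pos (by simp; omega)]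

lemma stepA_skip (st : List String × PySem.Set String) (v : String)
    (h : normalize_col v "" = "" ∨ normalize_col v "" ∈ st.2) :
    stepA st v = st := by
  unfold stepA
  rcases h with h | h
  · simp [h]
  · simp
    exact fun _ hx => absurd h hx

lemma stepA_keep (st : List String × PySem.Set String) (v : String)
    (h1 : ¬ (normalize_col v "" = "")) (h2 : normalize_col v "" ∉ st.2) :
    stepA st v = (st.1 ++ [normalize_col v ""], PySem.Set.add st.2 (normalize_col v "")) := by
  unfold stepA
  simp [h1]
  exact fun hx => absurd hx h2

-- ---- B's collapse loop as a pure recursion ----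
def dedupeRec : Option Int → List (Int × String) → List String
  | _, [] => []
  | prev, p :: rest =>
    if some p.1 ≠ prev then p.2 :: dedupeRec (some p.1) rest else dedupeRec prev rest

lemma foldl_dedupe (S : List (Int × String)) (out : List String) (prev : Option Int) :
    (S.foldl dedupeStep (out, prev)).1 = out ++ dedupeRec prev S := by
  induction S generalizing out prev with
  | nil => simp [dedupeRec]
  | cons p rest ih =>
    rw [List.foldl_cons]
    by_cases h : some p.1 ≠ prev
    · rw [show dedupeStep (out, prev) p = (out ++ [p.2], some p.1) from by
        simp only [dedupeStep]; rw [if_pos h]]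
      rw [ih, dedupeRec, if_pos h]
      simp
    · rw [show dedupeStep (out, prev) p = (out, prev) from by
        simp only [dedupeStep]; rw [if_neg h]]
      rw [ih, dedupeRec, if_neg h]

lemma mem_dedupeRec (S : List (Int × String)) (prev : Option Int) (t : String)
    (hs : S.Pairwise (fun a b => a.1 ≤ b.1))
    (hlb : ∀ j, prev = some j → ∀ p ∈ S, j ≤ p.1)
    (hfun : ∀ p ∈ S, ∀ q ∈ S, p.1 = q.1 → p.2 = q.2) :
    t ∈ dedupeRec prev S ↔ ∃ i, (i, t) ∈ S ∧ some i ≠ prev := by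
  induction S generalizing prev with
  | nil => simp [dedupeRec]
  | cons p rest ih =>
    obtain ⟨hhead, hs'⟩ := List.pairwise_cons.mp hs
    have hfun' : ∀ a ∈ rest, ∀ b ∈ rest, a.1 = b.1 → a.2 = b.2 :=
      fun a ha b hb => hfun a (List.mem_cons_of_mem _ ha) b (List.mem_cons_of_mem _ hb)
    have hlbp : ∀ j, some p.1 = some j → ∀ q ∈ rest, j ≤ q.1 := by
      intro j hj q hq; injection hj with hj; subst hj; exact hhead q hq
    by_cases h : some p.1 ≠ prev
    · rw [dedupeRec, if_pos h, List.mem_cons, ih (some p.1) hs' hlbp hfun']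
      constructor
      · rintro (rfl | ⟨i, hi, hne⟩)
        · exact ⟨p.1, by simp, h⟩
        · refine ⟨i, List.mem_cons_of_mem _ hi, ?_⟩
          intro he
          have hi1 : i ≤ p.1 := hlb i he.symm p (by simp)
          have hi2 : p.1 ≤ i := hhead _ hi
          exact hne (congrArg some (le_antisymm hi1 hi2))
      · rintro ⟨i, hi, hne⟩
        rcases List.mem_cons.mp hi with he | hi2
        · exact Or.inl (congrArg Prod.snd he)
        · by_cases hip : i = p.1
          · exact Or.inl (hfun (i, t) (List.mem_cons_of_mem _ hi2) p (by simp) hip)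
          · exact Or.inr ⟨i, hi2, fun hx => hip (Option.some.inj hx)⟩
    · rw [dedupeRec, if_neg h]
      have hp : some p.1 = prev := not_not.mp h
      have hlb2 : ∀ j, prev = some j → ∀ q ∈ rest, j ≤ q.1 := by
        intro j hj q hq; rw [← hp] at hj; injection hj with hj; subst hj; exact hhead q hq
      rw [ih prev hs' hlb2 hfun']
      constructor
      · rintro ⟨i, hi, hne⟩; exact ⟨i, List.mem_cons_of_mem _ hi, hne⟩
      · rintro ⟨i, hi, hne⟩
        rcases List.mem_cons.mp hi with he | hi2
        · exact absurd (by rw [← hp]; exact congrArg (fun q => some q.1) he) hne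
        · exact ⟨i, hi2, hne⟩

lemma dedupeRec_pairwise (S : List (Int × String)) (prev : Option Int)
    (hs : S.Pairwise (fun a b => a.1 ≤ b.1))
    (hlb : ∀ j, prev = some j → ∀ p ∈ S, j ≤ p.1)
    (hfun : ∀ p ∈ S, ∀ q ∈ S, p.1 = q.1 → p.2 = q.2)
    (hkey : ∀ p ∈ S, idxKey p.2 = p.1) :
    (dedupeRec prev S).Pairwise (fun a b => idxKey a < idxKey b) := by
  induction S generalizing prev with
  | nil => simp [dedupeRec]
  | cons p rest ih =>
    obtain ⟨hhead, hs'⟩ := List.pairwise_cons.mp hs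
    have hfun' : ∀ a ∈ rest, ∀ b ∈ rest, a.1 = b.1 → a.2 = b.2 :=
      fun a ha b hb => hfun a (List.mem_cons_of_mem _ ha) b (List.mem_cons_of_mem _ hb)
    have hkey' : ∀ a ∈ rest, idxKey a.2 = a.1 := fun a ha => hkey a (List.mem_cons_of_mem _ ha)
    have hlbp : ∀ j, some p.1 = some j → ∀ q ∈ rest, j ≤ q.1 := by
      intro j hj q hq; injection hj with hj; subst hj; exact hhead q hq
    by_cases h : some p.1 ≠ prev
    · rw [dedupeRec, if_pos h]
      refine List.pairwise_cons.mpr ⟨?_, ih (some p.1) hs' hlbp hfun' hkey'⟩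
      intro t ht
      obtain ⟨i, hi, hne⟩ := (mem_dedupeRec rest (some p.1) t hs' hlbp hfun').mp ht
      have hkt : idxKey t = i := hkey (i, t) (List.mem_cons_of_mem _ hi)
      have hkp : idxKey p.2 = p.1 := hkey p (by simp)
      have hle : p.1 ≤ i := hhead _ hi
      have hip : i ≠ p.1 := fun hx => hne (congrArg some hx)
      rw [hkt, hkp]; omega
    · rw [dedupeRec, if_neg h]
      have hp : some p.1 = prev := not_not.mp h
      refine ih prev hs' ?_ hfun' hkey'
      intro j hj q hq; rw [← hp] at hj; injection hj with hj; subst hj; exact hhead q hq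

-- ---- the two first loops simulate each other ----
lemma loop_sim (values : List String) (uniq : List String) (keyed : List (Int × String))
    (hnd : uniq.Nodup) (hgood : ∀ c ∈ uniq, GoodCol c)
    (hmem : ∀ c, c ∈ uniq ↔ ∃ i, (i, c) ∈ keyed)
    (hk : ∀ p ∈ keyed, col_to_index p.2 = some p.1 ∧ GoodCol p.2) :
    ∃ uniq2 : List String,
      values.foldl stepA (uniq, PySem.Set.ofList uniq) = (uniq2, PySem.Set.ofList uniq2) ∧
      uniq2.Nodup ∧ (∀ c ∈ uniq2, GoodCol c) ∧
      (∀ c, c ∈ uniq2 ↔ ∃ i, (i, c) ∈ values.foldl stepKey keyed) ∧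
      (∀ p ∈ values.foldl stepKey keyed, col_to_index p.2 = some p.1 ∧ GoodCol p.2) := by
  induction values generalizing uniq keyed with
  | nil => exact ⟨uniq, rfl, hnd, hgood, hmem, hk⟩
  | cons v vs ih =>
    rw [List.foldl_cons, List.foldl_cons]
    cases e : col_to_index (String.ofList (PySem.Chars.upper (PySem.Chars.strip v.toList))) with
    | none =>
      rw [stepA_skip _ _ (Or.inl (normalize_none v e))]
      have hB : stepKey keyed v = keyed := by unfold stepKey; simp only [e]
      rw [hB]
      exact ih uniq keyed hnd hgood hmem hk
    | some n =>
      have hcol := normalize_some v n e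
      have hpos : 0 < n := col_to_index_pos _ n e
      set tok := String.ofList (PySem.Chars.upper (PySem.Chars.strip v.toList)) with htok
      have hgoodtok : GoodCol tok := by
        constructor
        · rw [e]; rfl
        · rw [htok, String.toList_ofList]
          exact token_fixed v.toList
      have htokne : ¬ (normalize_col v "" = "") := by
        rw [hcol]
        intro h
        rw [h, show col_to_index "" = none from rfl] at e
        cases e
      have hB : stepKey keyed v = keyed ++ [(n, tok)] := by
        unfold stepKey
        simp only [← htok, e]
        rw [if_pos (by omega)]
      rw [hB]
      have hk2 : ∀ p ∈ keyed ++ [(n, tok)], col_to_index p.2 = some p.1 ∧ GoodCol p.2 := by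
        intro p hp
        rcases List.mem_append.mp hp with h | h
        · exact hk p h
        · simp at h; rw [h]; exact ⟨e, hgoodtok⟩
      by_cases hmemu : tok ∈ uniq
      · rw [stepA_skip _ _ (Or.inr (by rw [hcol]; simpa [PySem.Set.mem_ofList] using hmemu))]
        refine ih uniq (keyed ++ [(n, tok)]) hnd hgood ?_ hk2
        intro c
        rw [hmem c]
        constructor
        · rintro ⟨i, hi⟩; exact ⟨i, List.mem_append_left _ hi⟩
        · rintro ⟨i, hi⟩
          rcases List.mem_append.mp hi with h | h
          · exact ⟨i, h⟩
          · simp at h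
            rw [hmem tok] at hmemu
            obtain ⟨j, hj⟩ := hmemu
            exact h.2 ▸ ⟨j, hj⟩
      · rw [stepA_keep _ _ htokne (by rw [hcol]; simpa [PySem.Set.mem_ofList] using hmemu)]
        rw [hcol]
        have hset : PySem.Set.add (PySem.Set.ofList uniq) tok
            = PySem.Set.ofList (uniq ++ [tok]) :=
          (PySem.Set.ofList_append_singleton uniq _).symm
        rw [hset]
        have hnd2 : (uniq ++ [tok]).Nodup := by
          simp [List.nodup_append, hnd]
          exact fun a ha hx => hmemu (hx ▸ ha)
        have hgood2 : ∀ c ∈ uniq ++ [tok], GoodCol c := by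
          intro c hc
          rcases List.mem_append.mp hc with h | h
          · exact hgood c h
          · simp at h; rw [h]; exact hgoodtok
        refine ih (uniq ++ [tok]) (keyed ++ [(n, tok)]) hnd2 hgood2 ?_ hk2
        intro c
        constructor
        · intro hc
          rcases List.mem_append.mp hc with h | h
          · obtain ⟨i, hi⟩ := (hmem c).mp h
            exact ⟨i, List.mem_append_left _ hi⟩
          · simp at h
            exact ⟨n, List.mem_append_right _ (by simp [h])⟩
        · rintro ⟨i, hi⟩
          rcases List.mem_append.mp hi with h | h
          · exact List.mem_append_left _ ((hmem c).mpr ⟨i, h⟩)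
          · simp at h
            exact List.mem_append_right _ (by simp [h.2])

-- ===== VERDICT (by name: the statement is the Claim_ definition above) =====
theorem stable_sort_columns_spec : Claim_equal_stable_sort_columns := by
  intro values _
  show stable_sort_columns values = stable_sort_columns_alt values
  have hbridgeA : stable_sort_columns values
      = PySem.List.sorted (values.foldl stepA ([], PySem.Set.ofList [])).1 idxKey false := rfl
  obtain ⟨uniq2, hA, hnd, hgood, hmem, hk⟩ :=
    loop_sim values [] [] (by simp) (by simp) (by simp) (by simp)
  set keyed := values.foldl stepKey [] with hkeyed
  set S := PySem.List.sorted keyed (fun p => p.1) false with hS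
  have hbridgeB : stable_sort_columns_alt values = (S.foldl dedupeStep ([], none)).1 := rfl
  rw [hbridgeA, hbridgeB, hA, foldl_dedupe, List.nil_append]
  have hSperm : S.Perm keyed := PySem.List.sorted_perm _ _ _
  have hmemS : ∀ p : Int × String, p ∈ S ↔ p ∈ keyed := fun p => hSperm.mem_iff
  have hkS : ∀ p ∈ S, col_to_index p.2 = some p.1 ∧ GoodCol p.2 :=
    fun p hp => hk p ((hmemS p).mp hp)
  have hkeyS : ∀ p ∈ S, idxKey p.2 = p.1 := by
    intro p hp
    simp [idxKey, (hkS p hp).1]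
  have hsorted : S.Pairwise (fun a b => a.1 ≤ b.1) := PySem.List.sorted_pairwise _ _
  have hfun : ∀ p ∈ S, ∀ q ∈ S, p.1 = q.1 → p.2 = q.2 := by
    intro p hp q hq hpq
    exact good_inj _ _ (hkS p hp).2 (hkS q hq).2
      (by rw [hkeyS p hp, hkeyS q hq, hpq])
  have hlb : ∀ j, (none : Option Int) = some j → ∀ p ∈ S, j ≤ p.1 := by
    rintro j ⟨⟩
  have hpw : (dedupeRec none S).Pairwise (fun a b => idxKey a < idxKey b) :=
    dedupeRec_pairwise S none hsorted hlb hfun hkeyS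
  have hndB : (dedupeRec none S).Nodup :=
    hpw.imp (fun {a b} h => by intro he; rw [he] at h; omega)
  have hmemB : ∀ t, t ∈ dedupeRec none S ↔ t ∈ uniq2 := by
    intro t
    rw [mem_dedupeRec S none t hsorted hlb hfun, hmem t]
    constructor
    · rintro ⟨i, hi, -⟩; exact ⟨i, (hmemS _).mp hi⟩
    · rintro ⟨i, hi⟩; exact ⟨i, (hmemS _).mpr hi, by simp⟩
  have hperm : (dedupeRec none S).Perm uniq2 :=
    (List.perm_ext_iff_of_nodup hndB hnd).mpr hmemB
  exact PySem.List.sorted_eq_of_perm_of_pairwise_lt _ _ _ hperm hpw
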